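-- pv_equiv track=rewrite | github.com/ladyFaye1998/staad-pro-3d-generator | staad_generator/writer.py | _member_lines
-- ===== SOURCE A (Python) =====
-- def _member_lines(members: list[tuple[int, int, int, str]], chunk: int = 6) -> list[str]:
--     lines_out: list[str] = []
--     buf: list[str] = []
--     for mid, n1, n2, _ in members:
--         buf.append(f"{mid} {n1} {n2}")
--         if len(buf) >= chunk:
--             lines_out.append("; ".join(buf) + " ;")
--             buf = []
--     if buf:
--         lines_out.append("; ".join(buf) + " ;")
--     return lines_out
-- ===== SOURCE B (Python) =====
-- def _member_lines(members: list[tuple[int, int, int, str]], chunk: int = 6) -> list[str]: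
--     # Build all formatted strings first, then chunk by slicing.
--     # A non-positive chunk groups one item per line, exactly like chunk == 1.
--     strs = [f"{mid} {n1} {n2}" for mid, n1, n2, _ in members]
--     step = max(chunk, 1)
--     return ["; ".join(strs[i:i + step]) + " ;" for i in range(0, len(strs), step)]
-- ===== Notes on version B (the rewrite author's own statement) =====
-- stated objective: simpler
-- what changed: B formats all members into a flat list in one pass and then chunks it by index slicing with range(0, n, step), instead of A's running buffer that is tested and flushed inside the loop plus a trailing-flush branch; a non-positive chunk is normalised to step 1, which is exactly A's per-item flushing behaviour there.
import Mathlib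
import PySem

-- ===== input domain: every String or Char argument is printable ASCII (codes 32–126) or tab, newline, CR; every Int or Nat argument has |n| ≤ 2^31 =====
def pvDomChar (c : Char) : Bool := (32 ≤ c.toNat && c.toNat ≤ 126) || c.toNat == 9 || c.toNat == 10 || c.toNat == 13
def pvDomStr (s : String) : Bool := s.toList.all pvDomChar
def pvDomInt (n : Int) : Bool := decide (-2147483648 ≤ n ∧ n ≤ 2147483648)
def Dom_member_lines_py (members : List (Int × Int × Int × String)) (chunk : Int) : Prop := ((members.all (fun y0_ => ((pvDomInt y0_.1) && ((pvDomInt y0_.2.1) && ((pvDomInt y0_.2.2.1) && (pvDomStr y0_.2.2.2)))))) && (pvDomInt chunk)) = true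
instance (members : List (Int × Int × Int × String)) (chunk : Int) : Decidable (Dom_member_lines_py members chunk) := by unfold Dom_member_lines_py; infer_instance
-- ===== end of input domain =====

-- B separates formatting from chunking: it builds the flat list of formatted strings first,
-- then slices it into chunks of step = max(chunk, 1), instead of A's running buffer that is
-- tested and flushed each iteration (same behaviour, simpler decomposition).


-- shared f-string f"{mid} {n1} {n2}" (identical in Source A and Source B)
def pvFmt (m : Int × Int × Int × String) : String :=
  PySem.Int.toStr m.1 ++ " " ++ PySem.Int.toStr m.2.1 ++ " " ++ PySem.Int.toStr m.2.2.1

-- ===== PORT A =====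
def member_lines_py (members : List (Int × Int × Int × String)) (chunk : Int) : List String :=
  let st := members.foldl
    (fun (st : List String × List String) m =>
      let buf := st.2 ++ [pvFmt m]
      if chunk ≤ (buf.length : Int) then
        (st.1 ++ [PySem.Str.join "; " buf ++ " ;"], [])
      else (st.1, buf))
    ([], [])
  if st.2 ≠ [] then st.1 ++ [PySem.Str.join "; " st.2 ++ " ;"] else st.1

-- ===== PORT B =====
def member_lines_py_alt (members : List (Int × Int × Int × String)) (chunk : Int) : List String :=
  let strs := members.map pvFmt
  let step := max chunk 1
  (PySem.List.pyRange 0 (strs.length : Int) step).map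
    (fun i => PySem.Str.join "; " (PySem.List.slice strs (some i) (some (i + step))) ++ " ;")

-- ===== PRECONDITION & SPEC =====
def Spec_member_lines_py (members : List (Int × Int × Int × String)) (chunk : Int) (out : List String) : Prop := out = member_lines_py_alt members chunk
instance (members : List (Int × Int × Int × String)) (chunk : Int) (out : List String) : Decidable (Spec_member_lines_py members chunk out) := by unfold Spec_member_lines_py; infer_instance

-- ===== CLAIM (what is proved, stated in full; the proofs are below) =====
def Claim_equal_member_lines_py : Prop := ∀ (members : List (Int × Int × Int × String)) (chunk : Int), Dom_member_lines_py members chunk → Spec_member_lines_py members chunk (member_lines_py members chunk)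

-- ===== LEMMAS AND PROOFS =====

-- "; ".join(buf) + " ;"
def pvLine (buf : List String) : String := PySem.Str.join "; " buf ++ " ;"

-- chunks of size s+1
def pvChunk (g : List String → String) (s : Nat) : List String → List String
  | [] => []
  | x :: xs => g (x :: xs.take s) :: pvChunk g s (xs.drop s)
termination_by l => l.length
decreasing_by simp

theorem pvChunk_short (g : List String → String) (s : Nat) (l : List String)
    (h : l.length ≤ s + 1) (hne : l ≠ []) : pvChunk g s l = [g l] := by
  cases l with
  | nil => exact absurd rfl hne
  | cons x xs =>
    have hx : xs.length ≤ s := by simp at h; omega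
    simp [pvChunk, List.take_of_length_le hx, List.drop_of_length_le hx]

theorem A_chunk (chunk : Int) :
    ∀ (members : List (Int × Int × Int × String)) (lines buf : List String),
    buf.length < (max chunk 1).toNat →
    (let st := members.foldl
      (fun (st : List String × List String) m =>
        let b := st.2 ++ [pvFmt m]
        if chunk ≤ (b.length : Int) then (st.1 ++ [pvLine b], []) else (st.1, b)) (lines, buf)
     if st.2 ≠ [] then st.1 ++ [pvLine st.2] else st.1)
    = lines ++ pvChunk pvLine ((max chunk 1).toNat - 1) (buf ++ members.map pvFmt) := by
  intro members
  induction members with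
  | nil =>
    intro lines buf hlt
    simp only [List.foldl_nil, List.map_nil, List.append_nil]
    by_cases hb : buf = []
    · subst hb; simp [pvChunk]
    · rw [if_pos hb, pvChunk_short pvLine _ buf (by omega) hb]
  | cons m rest ih =>
    intro lines buf hlt
    simp only [List.foldl_cons, List.map_cons]
    have hS1 : 1 ≤ (max chunk 1).toNat := by omega
    by_cases hfl : chunk ≤ ((buf ++ [pvFmt m]).length : Int)
    · -- flush: buf ++ [pvFmt m] has length exactly (max chunk 1).toNat
      have hlen : (buf ++ [pvFmt m]).length = (max chunk 1).toNat := by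
        simp at hfl ⊢; omega
      simp only [if_pos hfl]
      rw [ih (lines ++ [pvLine (buf ++ [pvFmt m])]) [] (by simp only [List.length_nil]; omega)]
      obtain ⟨y, ys, hbs⟩ : ∃ y ys, buf ++ [pvFmt m] = y :: ys := by
        cases hb : buf ++ [pvFmt m] with
        | nil => simp at hb
        | cons a l => exact ⟨a, l, rfl⟩
      have hys : ys.length = (max chunk 1).toNat - 1 := by
        rw [hbs] at hlen; simp at hlen; omega
      have hsplit : buf ++ pvFmt m :: rest.map pvFmt = y :: (ys ++ rest.map pvFmt) := by
        rw [← List.cons_append, ← hbs, List.append_assoc]; simp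
      rw [hbs, hsplit]
      simp only [List.nil_append, pvChunk]
      rw [List.take_left' hys, List.drop_left' hys]
      simp
    · -- no flush
      have hlt' : (buf ++ [pvFmt m]).length < (max chunk 1).toNat := by
        simp at hfl ⊢; omega
      simp only [if_neg hfl]
      rw [ih lines (buf ++ [pvFmt m]) hlt']
      simp

-- range(0, n, s) for 0 < s, 0 < n peels off 0
theorem pyRange_pos_cons (s n : Int) (hs : 0 < s) (hn : 0 < n) :
    PySem.List.pyRange 0 n s = 0 :: PySem.List.pyRange s n s := by
  rw [PySem.List.pyRange_of_pos 0 n hs, PySem.List.pyRange_of_pos s n hs]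
  have hdiv : ((n - 0 + s - 1) / s).toNat
      = (if s < n then ((n - s + s - 1) / s).toNat else 0) + 1 := by
    by_cases h : s < n
    · rw [if_pos h]
      have e : n - 0 + s - 1 = (n - s + s - 1) + 1 * s := by ring
      rw [e, Int.add_mul_ediv_right _ _ (ne_of_gt hs)]
      have : 0 ≤ (n - s + s - 1) / s := Int.ediv_nonneg (by omega) (by omega)
      omega
    · rw [if_neg h]
      have e : n - 0 + s - 1 = (n - 1) + 1 * s := by ring
      rw [e, Int.add_mul_ediv_right _ _ (ne_of_gt hs),
          Int.ediv_eq_zero_of_lt (by omega) (by omega)]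
      omega
  rw [if_pos (by omega : (0:Int) < n), hdiv, List.range_succ_eq_map]
  simp only [List.map_cons, List.map_map]
  congr 1
  · simp
  · apply List.map_congr_left; intro k _; simp; ring

-- range(s, n, s) is range(0, n - s, s) shifted by s
theorem pyRange_pos_shift (s n : Int) (hs : 0 < s) :
    PySem.List.pyRange s n s = (PySem.List.pyRange 0 (n - s) s).map (· + s) := by
  rw [PySem.List.pyRange_of_pos s n hs, PySem.List.pyRange_of_pos 0 (n - s) hs]
  rw [List.map_map]
  have : (if s < n then ((n - s + s - 1) / s).toNat else 0)
       = (if 0 < n - s then ((n - s - 0 + s - 1) / s).toNat else 0) := by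
    by_cases h : s < n
    · rw [if_pos h, if_pos (by omega)]; ring_nf
    · rw [if_neg h, if_neg (by omega)]
  rw [this]
  apply List.map_congr_left; intro k _; simp; ring

theorem B_chunk (s : Int) (hs : 0 < s) :
    ∀ (N : Nat) (strs : List String), strs.length ≤ N →
    (PySem.List.pyRange 0 (strs.length : Int) s).map
      (fun i => pvLine (PySem.List.slice strs (some i) (some (i + s))))
    = pvChunk pvLine (s.toNat - 1) strs := by
  intro N
  induction N with
  | zero =>
    intro strs h
    have : strs = [] := List.eq_nil_of_length_eq_zero (by omega)
    subst this
    have h0 : PySem.List.pyRange 0 (0:Int) s = [] := by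
      rw [PySem.List.pyRange_of_pos _ _ hs]; simp
    simp [pvChunk, h0]
  | succ N ih =>
    intro strs h
    cases hstrs : strs with
    | nil =>
      have h0 : PySem.List.pyRange 0 (0:Int) s = [] := by
        rw [PySem.List.pyRange_of_pos _ _ hs]; simp
      simp [pvChunk, h0]
    | cons x xs =>
      subst hstrs
      have hn : 0 < ((x :: xs).length : Int) := by
        simp only [List.length_cons]; omega
      rw [pyRange_pos_cons s _ hs hn, List.map_cons,
          pyRange_pos_shift s _ hs, List.map_map]
      have hhead : PySem.List.slice (x :: xs) (some 0) (some (0 + s)) = x :: xs.take (s.toNat - 1) := by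
        obtain ⟨k, hk⟩ : ∃ k, s.toNat = k + 1 := ⟨s.toNat - 1, by omega⟩
        rw [zero_add, PySem.List.slice_zero_start, PySem.List.slice_to, hk,
            List.take_succ_cons]
        · simp
        · omega
      rw [hhead]
      have htail : ((x :: xs).drop s.toNat) = xs.drop (s.toNat - 1) := by
        obtain ⟨k, hk⟩ : ∃ k, s.toNat = k + 1 := ⟨s.toNat - 1, by omega⟩
        rw [hk, List.drop_succ_cons]
        simp
      by_cases hle : ((x :: xs).length : Int) - s ≤ 0
      · -- remainder empty
        have h1 : PySem.List.pyRange 0 (((x :: xs).length : Int) - s) s = [] := by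
          rw [PySem.List.pyRange_of_pos _ _ hs, if_neg (by omega)]
          simp
        rw [h1]
        have h2 : xs.drop (s.toNat - 1) = [] := by
          apply List.drop_of_length_le
          simp only [List.length_cons] at hle
          omega
        simp [pvChunk, h2]
      · -- remainder nonempty: recurse on the dropped list
        have hlen : ((((x :: xs).drop s.toNat).length : Nat) : Int) = ((x :: xs).length : Int) - s := by
          simp only [List.length_drop, List.length_cons] at hle ⊢
          omega
        have heq : (PySem.List.pyRange 0 (((x :: xs).length : Int) - s) s).map
              ((fun i => pvLine (PySem.List.slice (x :: xs) (some i) (some (i + s)))) ∘ (· + s))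
            = (PySem.List.pyRange 0 ((((x :: xs).drop s.toNat).length : Nat) : Int) s).map
              (fun i => pvLine (PySem.List.slice ((x :: xs).drop s.toNat) (some i) (some (i + s)))) := by
          rw [hlen]
          apply List.map_congr_left
          intro i hi
          have hi0 : 0 ≤ i := ((PySem.List.mem_pyRange_iff_of_pos hs i).mp hi).1
          simp only [Function.comp_apply]
          congr 1
          rw [PySem.List.slice_toNat, PySem.List.slice_toNat, List.drop_drop]
          · congr 1
            · omega
            · congr 1
              omega
          all_goals omega
        rw [heq, ih _ (by simp only [List.length_drop, List.length_cons] at h ⊢; omega)]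
        conv_lhs => rw [htail]
        rw [pvChunk]

-- ===== VERDICT (by name: the statement is the Claim_ definition above) =====
theorem member_lines_py_spec : Claim_equal_member_lines_py := by
  intro members chunk _
  unfold Spec_member_lines_py
  have hs : 0 < max chunk 1 := by omega
  have hA := A_chunk chunk members [] [] (by simp only [List.length_nil]; omega)
  have hB := B_chunk (max chunk 1) hs (members.map pvFmt).length (members.map pvFmt) (le_refl _)
  simp only [pvLine] at hA hB
  simp only [List.nil_append] at hA
  simp only [member_lines_py, member_lines_py_alt]
  rw [hA, ← hB]
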